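-- pv_equiv track=rewrite | github.com/csiiiv/dpwh-2026-hierarchy-analysis | scripts/build_hierarchy.py | find_hierarchy_info
-- ===== SOURCE A (Python) =====
-- from typing import List, Dict, Any, Optional
--
-- def is_bullet(value: str) -> bool:
--     """
--     Check if a value is a bullet/numbering marker (like 'a.', '1.0', '2.0', etc.).
--     Bullets are typically short (1-3 characters) and used for list numbering.
--
--     Args:
--         value: Cell value to check
--
--     Returns:
--         True if the value appears to be a bullet marker
--     """
--     if not value:
--         return False
--
--     value = value.strip()
--
--     # Bullets are typically very short (1-4 characters max)
--     # Long values are definitely not bullets (like amounts: '18371150000.0')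
--     if len(value) > 4:
--         return False
--
--     # Single letter followed by period (like 'a.', 'b.')
--     if len(value) == 2 and value[-1] == '.' and value[0].isalpha():
--         return True
--
--     # Number followed by period (like '1.', '2.', '10.')
--     if value[-1] == '.' and value[:-1].isdigit():
--         return True
--
--     # Number with decimal (like '1.0', '2.0', '10.0') - but only if short
--     if '.' in value and len(value) <= 4:
--         parts = value.split('.')
--         if len(parts) == 2 and parts[0].isdigit() and parts[1].isdigit():
--             return True
--
--     # Just a single character (like 'a', 'b', '1', '2')
--     if len(value) == 1 and (value.isalpha() or value.isdigit()):
--         return True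
--
--     return False
--
-- def find_hierarchy_info(row: List[str], start_col: int = 1) -> Optional[tuple]:
--     """
--     Find hierarchy level and value column in a row.
--     If a bullet marker is found, the bullet's column determines hierarchy level,
--     and the value is in the column immediately to the right.
--     If no bullet is found, the first non-empty column is both level and value location.
--
--     Args:
--         row: List of cell values
--         start_col: Column index to start searching from (default: 1)
--
--     Returns:
--         Tuple of (hierarchy_column, value_column) or None if row is empty
--     """
--     # First, look for bullet markers
--     for i in range(start_col, len(row)):
--         if row[i] and row[i].strip():
--             value = row[i].strip()
--             if is_bullet(value):
--                 # Found a bullet - hierarchy level is this column, value is next column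
--                 value_col = i + 1
--                 if value_col < len(row) and row[value_col] and row[value_col].strip():
--                     return (i, value_col)
--                 # Bullet found but no value in next column - skip this row
--                 return None
--
--     # No bullet found - find first non-empty column (it's both level and value)
--     for i in range(start_col, len(row)):
--         if row[i] and row[i].strip():
--             value = row[i].strip()
--             # Make sure it's not a bullet (shouldn't happen, but just in case)
--             if not is_bullet(value):
--                 return (i, i)
--
--     return None
-- ===== SOURCE B (Python) =====
-- from typing import List, Optional
--
-- def is_bullet(value: str) -> bool:
--     if not value:
--         return False
--     value = value.strip()
--     if len(value) > 4:
--         return False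
--     if len(value) == 2 and value[-1] == '.' and value[0].isalpha():
--         return True
--     if value[-1] == '.' and value[:-1].isdigit():
--         return True
--     if '.' in value and len(value) <= 4:
--         parts = value.split('.')
--         if len(parts) == 2 and parts[0].isdigit() and parts[1].isdigit():
--             return True
--     if len(value) == 1 and (value.isalpha() or value.isdigit()):
--         return True
--     return False
--
-- def find_hierarchy_info(row: List[str], start_col: int = 1) -> Optional[tuple]:
--     # Single pass: remember the first non-empty non-bullet column as a fallback;
--     # stop at the first bullet and decide from its right neighbour.
--     fallback = None
--     for i in range(start_col, len(row)):
--         cell = row[i]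
--         if cell and cell.strip():
--             value = cell.strip()
--             if is_bullet(value):
--                 value_col = i + 1
--                 if value_col < len(row) and row[value_col] and row[value_col].strip():
--                     return (i, value_col)
--                 return None
--             if fallback is None:
--                 fallback = i
--     return (fallback, fallback) if fallback is not None else None
-- ===== Notes on version B (the rewrite author's own statement) =====
-- stated objective: simpler
-- what changed: Replaces A's two sequential scans over the columns (one for a bullet, a second from the start for the first non-empty cell) by a single pass that remembers the first non-empty non-bullet column in a fallback accumulator and short-circuits at the first bullet.
import Mathlib
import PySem

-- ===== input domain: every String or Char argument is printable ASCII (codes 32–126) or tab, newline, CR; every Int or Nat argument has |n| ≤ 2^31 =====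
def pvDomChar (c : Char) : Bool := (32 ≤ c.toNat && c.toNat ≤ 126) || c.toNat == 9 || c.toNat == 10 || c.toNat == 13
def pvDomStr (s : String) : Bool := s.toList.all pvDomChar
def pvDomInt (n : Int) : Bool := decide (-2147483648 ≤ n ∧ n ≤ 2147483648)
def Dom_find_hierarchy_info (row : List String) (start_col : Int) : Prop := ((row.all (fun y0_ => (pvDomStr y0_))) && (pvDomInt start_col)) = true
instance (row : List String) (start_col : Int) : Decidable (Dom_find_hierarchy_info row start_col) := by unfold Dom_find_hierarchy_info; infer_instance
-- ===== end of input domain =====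

-- B replaces A's two passes over the columns by one pass with a fallback accumulator (objective: simpler; same cost).

-- ===== PORT A =====
-- shared module helper is_bullet (used verbatim by both A and B, as in the Python module)
def is_bullet (value : String) : Bool :=
  if value == "" then false
  else
    let v := PySem.Str.strip value
    if PySem.Str.len v > 4 then false
    else if PySem.Str.len v == 2 && (PySem.Str.pyGet? v (-1) == some '.')
            && (match PySem.Str.pyGet? v 0 with | some c => PySem.Chars.isalpha c | none => false) then true
    else if (PySem.Str.pyGet? v (-1) == some '.') && PySem.Str.strIsdigit (PySem.Str.slice v none (some (-1))) then true
    else if PySem.Str.isIn "." v && PySem.Str.len v ≤ 4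
            && (match PySem.Str.split? v "." with
                | some parts => parts.length == 2 && PySem.Str.strIsdigit (parts.getD 0 "")
                                  && PySem.Str.strIsdigit (parts.getD 1 "")
                | none => false) then true
    else if PySem.Str.len v == 1 && (PySem.Str.strIsalpha v || PySem.Str.strIsdigit v) then true
    else false

-- truthiness of `row[i] and row[i].strip()`
def cellTruthy (c : String) : Bool := (c != "") && (PySem.Str.strip c != "")

-- `value_col < len(row) and row[value_col] and row[value_col].strip()` (shared by both ports)
def nextOk (row : List String) (vc : Int) : Bool :=
  decide (vc < (row.length : Int)) &&
    (match PySem.List.pyGet? row vc with | some c => cellTruthy c | none => false)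

-- A's first loop: `some r` = early return with result r, `none` = fell through
def aBulletScan (row : List String) : List Int → Option (Option (Int × Int))
  | [] => none
  | i :: rest =>
    match PySem.List.pyGet? row i with
    | none => some none   -- IndexError in Python; excluded by Pre_
    | some cell =>
      if cellTruthy cell then
        if is_bullet (PySem.Str.strip cell) then
          if nextOk row (i + 1) then some (some (i, i + 1)) else some none
        else aBulletScan row rest
      else aBulletScan row rest

-- A's second loop
def aFallbackScan (row : List String) : List Int → Option (Int × Int)
  | [] => none
  | i :: rest =>
    match PySem.List.pyGet? row i with
    | none => none        -- IndexError in Python; excluded by Pre_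
    | some cell =>
      if cellTruthy cell then
        if !is_bullet (PySem.Str.strip cell) then some (i, i) else aFallbackScan row rest
      else aFallbackScan row rest

def find_hierarchy_info (row : List String) (start_col : Int) : Option (Int × Int) :=
  let idxs := PySem.List.pyRange start_col (row.length : Int) 1
  match aBulletScan row idxs with
  | some r => r
  | none => aFallbackScan row idxs

-- ===== PORT B =====
-- B's single loop with a fallback accumulator
def bScan (row : List String) (fallback : Option Int) : List Int → Option (Int × Int)
  | [] => match fallback with | some f => some (f, f) | none => none
  | i :: rest =>
    match PySem.List.pyGet? row i with
    | none => none        -- IndexError in Python; excluded by Pre_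
    | some cell =>
      if cellTruthy cell then
        if is_bullet (PySem.Str.strip cell) then
          if nextOk row (i + 1) then some (i, i + 1) else none
        else bScan row (match fallback with | none => some i | some f => some f) rest
      else bScan row fallback rest

def find_hierarchy_info_alt (row : List String) (start_col : Int) : Option (Int × Int) :=
  bScan row none (PySem.List.pyRange start_col (row.length : Int) 1)

-- ===== PRECONDITION & SPEC =====
-- Pre_ excludes exactly start_col < -len(row): there Python A (and B alike) raises IndexError on row[start_col].
def Pre_find_hierarchy_info (row : List String) (start_col : Int) : Prop :=
  -(row.length : Int) ≤ start_col
instance (row : List String) (start_col : Int) : Decidable (Pre_find_hierarchy_info row start_col) := by unfold Pre_find_hierarchy_info; infer_instance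

def pvWitness_find_hierarchy_info : List String × Int := ([" ", "a.", "x"], 1)

def Spec_find_hierarchy_info (row : List String) (start_col : Int) (out : Option (Int × Int)) : Prop := out = find_hierarchy_info_alt row start_col
instance (row : List String) (start_col : Int) (out : Option (Int × Int)) : Decidable (Spec_find_hierarchy_info row start_col out) := by unfold Spec_find_hierarchy_info; infer_instance

-- ===== CLAIM (what is proved, stated in full; the proofs are below) =====
def Claim_equal_find_hierarchy_info : Prop := ∀ (row : List String) (start_col : Int), Dom_find_hierarchy_info row start_col → Pre_find_hierarchy_info row start_col → Spec_find_hierarchy_info row start_col (find_hierarchy_info row start_col)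

-- ===== LEMMAS AND PROOFS =====

-- Loop invariant: B's single pass over any index list, with any accumulated fallback,
-- computes A's "first loop, then fallback, then second loop" combination.
lemma bScan_eq (row : List String) (l : List Int) (fb : Option Int) :
    bScan row fb l =
      match aBulletScan row l with
      | some r => r
      | none => match fb with | some f => some (f, f) | none => aFallbackScan row l := by
  induction l generalizing fb with
  | nil => cases fb <;> rfl
  | cons i rest ih =>
    simp only [bScan, aBulletScan, aFallbackScan]
    cases h : PySem.List.pyGet? row i with
    | none => rfl
    | some cell =>
      by_cases ht : cellTruthy cell = true
      · simp only [ht, if_true]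
        by_cases hb : is_bullet (PySem.Str.strip cell) = true
        · simp only [hb, if_true]
          by_cases hn : nextOk row (i + 1) = true <;> simp [hn]
        · cases hs : aBulletScan row rest with
          | some r => simp [hb, ih, hs]
          | none => cases fb <;> simp [hb, ih, hs]
      · cases hs : aBulletScan row rest with
        | some r => simp [ht, ih, hs]
        | none => cases fb <;> simp [ht, ih, hs]

-- ===== VERDICT (by name: the statement is the Claim_ definition above) =====
theorem find_hierarchy_info_spec : Claim_equal_find_hierarchy_info := by
  intro row start_col _ _
  unfold Spec_find_hierarchy_info find_hierarchy_info find_hierarchy_info_alt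
  rw [bScan_eq]
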